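-- pv_equiv track=rewrite | github.com/JiLiBIT/SocioGen | utils.py | get_theme
-- ===== SOURCE A (Python) =====
-- def get_theme(number_str):
--     theme_mapping = {
--         range(1, 6): "个人与社会",
--         range(6, 11): "积极与消极",
--         range(11, 16): "理性与感性",
--     }
--
--     for num_range, theme in theme_mapping.items():
--         if int(number_str) in num_range:
--             return theme
--     return "未知主题"  # 处理超出范围的情况
-- ===== SOURCE B (Python) =====
-- def get_theme(number_str):
--     n = int(number_str)
--     if 1 <= n <= 15:
--         return ["个人与社会", "积极与消极", "理性与感性"][(n - 1) // 5]
--     return "未知主题"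
-- ===== Notes on version B (the rewrite author's own statement) =====
-- stated objective: simpler
-- what changed: Replaces the loop over a dict of range objects with one membership test per range by a single bounds check and a closed-form arithmetic index (n-1)//5 into a themes list.
import Mathlib
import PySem

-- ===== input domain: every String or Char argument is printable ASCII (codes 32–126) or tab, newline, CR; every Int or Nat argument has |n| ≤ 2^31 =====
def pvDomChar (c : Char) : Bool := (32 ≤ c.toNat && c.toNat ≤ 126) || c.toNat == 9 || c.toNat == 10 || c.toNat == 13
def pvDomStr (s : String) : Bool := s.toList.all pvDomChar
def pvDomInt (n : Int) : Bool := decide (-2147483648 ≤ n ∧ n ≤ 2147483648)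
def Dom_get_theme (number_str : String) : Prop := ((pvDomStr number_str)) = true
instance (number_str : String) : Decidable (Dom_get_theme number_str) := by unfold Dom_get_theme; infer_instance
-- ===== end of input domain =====

-- B replaces A's loop over (range, theme) pairs by one bounds check and a closed-form index (n-1)//5 into a themes list (objective: simpler).

-- ===== PORT A =====
-- A's loop over the dict's (range, theme) items, in insertion order; membership
-- 'int(number_str) in range(a, b)' (step 1) is a ≤ n < b.
def getThemeLoop (n : Int) : List (Int × Int × String) → String
  | [] => "未知主题"
  | (a, b, t) :: rest => if a ≤ n ∧ n < b then t else getThemeLoop n rest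

def get_theme (number_str : String) : String :=
  match PySem.Int.ofStr? number_str with
  | none => ""  -- Python raises ValueError here; excluded by Pre_
  | some n => getThemeLoop n [(1, 6, "个人与社会"), (6, 11, "积极与消极"), (11, 16, "理性与感性")]

-- ===== PORT B =====
def get_theme_alt (number_str : String) : String :=
  match PySem.Int.ofStr? number_str with
  | none => ""  -- Python raises ValueError here; excluded by Pre_
  | some n =>
    if 1 ≤ n ∧ n ≤ 15 then
      (PySem.List.pyGet? ["个人与社会", "积极与消极", "理性与感性"] (PySem.Int.floordiv (n - 1) 5)).getD ""
    else "未知主题"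

-- ===== PRECONDITION & SPEC =====
-- A raises ValueError when int(number_str) fails; Pre_ excludes exactly those inputs.
def Pre_get_theme (number_str : String) : Prop := (PySem.Int.ofStr? number_str).isSome = true
instance (number_str : String) : Decidable (Pre_get_theme number_str) := by unfold Pre_get_theme; infer_instance
def pvWitness_get_theme : String := "7"

def Spec_get_theme (number_str : String) (out : String) : Prop := out = get_theme_alt number_str
instance (number_str : String) (out : String) : Decidable (Spec_get_theme number_str out) := by unfold Spec_get_theme; infer_instance

-- ===== CLAIM =====
def Claim_equal_get_theme : Prop := ∀ (number_str : String), Dom_get_theme number_str → Pre_get_theme number_str → Spec_get_theme number_str (get_theme number_str)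

-- ===== LEMMAS AND PROOFS =====
theorem getTheme_core (n : Int) :
    getThemeLoop n [(1, 6, "个人与社会"), (6, 11, "积极与消极"), (11, 16, "理性与感性")] =
    (if 1 ≤ n ∧ n ≤ 15 then
      (PySem.List.pyGet? ["个人与社会", "积极与消极", "理性与感性"] (PySem.Int.floordiv (n - 1) 5)).getD ""
    else "未知主题") := by
  simp only [getThemeLoop]
  by_cases h1 : 1 ≤ n ∧ n < 6
  · have hd : (n - 1) / 5 = 0 := by omega
    simp [h1, show n ≤ 15 by omega, hd,
      PySem.List.pyGet?, PySem.List.pyIdx?]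
  · by_cases h2 : 6 ≤ n ∧ n < 11
    · have hd : (n - 1) / 5 = 1 := by omega
      simp [h1, h2, show 1 ≤ n ∧ n ≤ 15 by omega, hd,
        PySem.List.pyGet?, PySem.List.pyIdx?]
    · by_cases h3 : 11 ≤ n ∧ n < 16
      · have hd : (n - 1) / 5 = 2 := by omega
        simp [h1, h2, h3, show 1 ≤ n ∧ n ≤ 15 by omega, hd,
          PySem.List.pyGet?, PySem.List.pyIdx?]
        omega
      · simp [h1, h2, h3, show ¬ (1 ≤ n ∧ n ≤ 15) by omega]

-- ===== VERDICT =====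
theorem get_theme_spec : Claim_equal_get_theme := by
  intro s _ hpre
  unfold Spec_get_theme get_theme get_theme_alt
  cases h : PySem.Int.ofStr? s with
  | none => rfl
  | some n => exact getTheme_core n
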